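-- pv_equiv track=rewrite | github.com/TheCheapestPixels/pychology | pychology/search.py | generate_move_combinations
-- ===== SOURCE A (Python) =====
-- import itertools
--
-- def generate_move_combinations(state, moves):
--     players = list(moves.keys())
--     # Some players may not have any move available. The basic
--     # product of moves would thus contain no moves. So here we use
--     # None to fake a "pass" move.
--     for k in moves.keys():
--         if not moves[k]:
--             moves[k] = [None]
--     # Now we figure out all possible combinations...
--     combos = list(itertools.product(*[moves[p] for p in players]))
--     # ...and turn them back into move format.
--     combos = [dict(zip(players, combi)) for combi in combos]
--     return combos
-- ===== SOURCE B (Python) =====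
-- def generate_move_combinations(state, moves):
--     # Same in-place normalisation as the original: empty move lists become a "pass".
--     for k, v in list(moves.items()):
--         if not v:
--             moves[k] = [None]
--     # Build the Cartesian product by a left fold over the players, without
--     # itertools: the last player's moves vary fastest, matching product's order.
--     result = [{}]
--     for p, ms in moves.items():
--         result = [{**partial, p: m} for partial in result for m in ms]
--     return result
-- ===== Notes on version B (the rewrite author's own statement) =====
-- stated objective: alternative
-- what changed: Replaces itertools.product over a keys list plus dict(zip(...)) reassembly by a single left fold that extends a growing list of partial dicts one player at a time, building each combination dict directly.
import Mathlib
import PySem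

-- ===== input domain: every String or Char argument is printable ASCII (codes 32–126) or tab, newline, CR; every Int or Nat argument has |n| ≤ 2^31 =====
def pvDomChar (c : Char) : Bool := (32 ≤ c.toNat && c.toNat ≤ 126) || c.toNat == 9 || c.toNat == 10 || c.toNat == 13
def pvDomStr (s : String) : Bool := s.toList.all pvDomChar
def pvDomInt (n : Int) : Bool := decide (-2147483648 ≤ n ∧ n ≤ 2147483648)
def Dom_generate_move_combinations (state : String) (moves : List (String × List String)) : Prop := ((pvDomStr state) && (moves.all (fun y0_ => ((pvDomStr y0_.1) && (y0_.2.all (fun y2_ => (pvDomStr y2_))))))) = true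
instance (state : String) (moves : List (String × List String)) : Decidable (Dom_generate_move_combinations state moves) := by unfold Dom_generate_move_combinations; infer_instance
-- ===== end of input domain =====

-- B builds the product by a left fold extending partial dicts instead of itertools.product + dict(zip);
-- objective: alternative decomposition of the same cost. Both A and B mutate the caller's `moves` dict the
-- same way (empty move lists become [None]); the equivalence proved here is about the RETURN value only.

-- ===== PORT A =====
-- itertools.product(*lists): the last list varies fastest.
def pvProduct (ls : List (List (Option String))) : List (List (Option String)) :=
  match ls with
  | [] => [[]]
  | xs :: rest => xs.flatMap (fun x => (pvProduct rest).map (fun t => x :: t))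

-- Python's dict values are `list[str]`, later overwritten by [None]; we embed both into List (Option String)
-- (some = a real move string, none = the faked "pass" move), which is the type-convention rendering.
def generate_move_combinations (state : String) (moves : List (String × List String)) : List (List (String × Option String)) :=
  let d0 : PySem.Dict String (List (Option String)) :=
    PySem.Dict.mk (moves.map (fun kv => (kv.1, kv.2.map some)))
  let players := PySem.Dict.keys d0
  -- for k in moves.keys(): if not moves[k]: moves[k] = [None]
  let d := players.foldl
    (fun d k => if (PySem.Dict.getD d k []).isEmpty then PySem.Dict.insert d k [none] else d) d0
  let combos := pvProduct (players.map (fun p => PySem.Dict.getD d p []))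
  combos.map (fun combi => (PySem.Dict.ofList (players.zip combi)).items)

-- ===== PORT B =====
def generate_move_combinations_alt (state : String) (moves : List (String × List String)) : List (List (String × Option String)) :=
  -- for k, v in list(moves.items()): if not v: moves[k] = [None]   (a dict's keys are distinct,
  -- so on the assoc-list rendering this normalisation is an entrywise map)
  let fixed : List (String × List (Option String)) :=
    moves.map (fun kv => (kv.1, if kv.2.isEmpty then [none] else kv.2.map some))
  -- result = [{}]; for p, ms in moves.items(): result = [{**part, p: m} for part in result for m in ms]   -- "partial" is a Lean keyword; named part here
  let result := fixed.foldl
    (fun result pm => result.flatMap (fun part => pm.2.map (fun m => PySem.Dict.insert part pm.1 m)))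
    ([PySem.Dict.empty] : List (PySem.Dict String (Option String)))
  result.map (fun d => d.items)

-- ===== PRECONDITION & SPEC =====
-- Pre_ only requires distinct keys: `moves` is a Python dict, and the association-list rendering of a dict
-- can never carry a duplicate key, so no narrowing of A's actual domain occurs.
def Pre_generate_move_combinations (state : String) (moves : List (String × List String)) : Prop :=
  (moves.map Prod.fst).Nodup
instance (state : String) (moves : List (String × List String)) : Decidable (Pre_generate_move_combinations state moves) := by unfold Pre_generate_move_combinations; infer_instance

def pvWitness_generate_move_combinations : String × (List (String × List String)) :=
  ("s", [("p1", ["a", "b"]), ("p2", [])])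

def Spec_generate_move_combinations (state : String) (moves : List (String × List String)) (out : List (List (String × Option String))) : Prop := out = generate_move_combinations_alt state moves
instance (state : String) (moves : List (String × List String)) (out : List (List (String × Option String))) : Decidable (Spec_generate_move_combinations state moves out) := by unfold Spec_generate_move_combinations; infer_instance

-- ===== CLAIM (what is proved, stated in full; the proofs are below) =====
def Claim_equal_generate_move_combinations : Prop := ∀ (state : String) (moves : List (String × List String)), Dom_generate_move_combinations state moves → Pre_generate_move_combinations state moves → Spec_generate_move_combinations state moves (generate_move_combinations state moves)

-- ===== LEMMAS AND PROOFS =====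

-- "fix" = what the normalisation loop does to one value.
def pvFix (w : List (Option String)) : List (Option String) := if w.isEmpty then [none] else w

-- Effect of A's normalisation fold on any single lookup (no Nodup needed: pvFix is idempotent).
lemma fixFold_getD (ks : List String) (d : PySem.Dict String (List (Option String))) (k : String) :
    PySem.Dict.getD
      (ks.foldl (fun d k =>
        if (PySem.Dict.getD d k []).isEmpty then PySem.Dict.insert d k [none] else d) d) k []
      = if k ∈ ks then pvFix (PySem.Dict.getD d k []) else PySem.Dict.getD d k [] := by
  induction ks generalizing d with
  | nil => simp
  | cons a rest ih =>
    simp only [List.foldl_cons, ih, List.mem_cons]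
    by_cases hk : k = a
    · subst hk
      by_cases he : (PySem.Dict.getD d k []).isEmpty
      · simp [he, PySem.Dict.getD_insert_self, pvFix]
      · simp only [he]
        by_cases hm : k ∈ rest <;> simp [hm, pvFix, he]
    · have hD : PySem.Dict.getD
          (if (PySem.Dict.getD d a []).isEmpty then PySem.Dict.insert d a [none] else d) k []
          = PySem.Dict.getD d k [] := by
        split_ifs with he
        · exact PySem.Dict.getD_insert_of_ne _ _ _ hk
        · rfl
      rw [hD]
      by_cases hm : k ∈ rest <;> simp [hm, hk]

-- extend a dict by a list of key/value pairs, left to right (= the body of dict(zip(...)))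
def pvExtend (d : PySem.Dict String (Option String)) (ps : List (String × Option String)) :
    PySem.Dict String (Option String) :=
  ps.foldl (fun d p => PySem.Dict.insert d p.1 p.2) d

-- B's fold characterised in closed form via pvProduct.
lemma foldB_eq (ps : List (String × List (Option String)))
    (R : List (PySem.Dict String (Option String))) :
    ps.foldl (fun result pm =>
        result.flatMap (fun part => pm.2.map (fun m => PySem.Dict.insert part pm.1 m))) R
      = R.flatMap (fun d =>
          (pvProduct (ps.map (·.2))).map (fun c => pvExtend d ((ps.map (·.1)).zip c))) := by
  induction ps generalizing R with
  | nil => simp [pvProduct, pvExtend]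
  | cons pm rest ih =>
    simp only [List.foldl_cons, ih, List.map_cons, pvProduct, List.flatMap_assoc,
      List.flatMap_map, List.map_flatMap, List.map_map]
    apply List.flatMap_congr
    intro d _
    apply List.flatMap_congr
    intro m _
    apply List.map_congr_left
    intro c _
    simp [pvExtend, List.zip_cons_cons]

theorem generate_move_combinations_spec_aux (state : String)
    (moves : List (String × List String))
    (hnd : (moves.map Prod.fst).Nodup) :
    generate_move_combinations state moves = generate_move_combinations_alt state moves := by
  unfold generate_move_combinations generate_move_combinations_alt
  simp only [foldB_eq, List.flatMap_cons, List.flatMap_nil, List.append_nil]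
  have hkeys : PySem.Dict.keys (PySem.Dict.mk (moves.map (fun kv => (kv.1, kv.2.map some))))
      = moves.map Prod.fst := by
    simp [PySem.Dict.keys, List.map_map]
  have hndk : (PySem.Dict.mk (moves.map (fun kv => (kv.1, kv.2.map some)))).keys.Nodup := by
    rw [hkeys]; exact hnd
  -- the list fed to pvProduct on A's side equals the normalised values on B's side
  have hlists :
      (moves.map Prod.fst).map (fun p =>
          PySem.Dict.getD
            ((moves.map Prod.fst).foldl (fun d k =>
              if (PySem.Dict.getD d k []).isEmpty then PySem.Dict.insert d k [none] else d)
              (PySem.Dict.mk (moves.map (fun kv => (kv.1, kv.2.map some))))) p [])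
        = moves.map (fun kv => if kv.2.isEmpty then [none] else kv.2.map some) := by
    rw [List.map_map]
    apply List.map_congr_left
    intro kv hkv
    simp only [Function.comp]
    rw [fixFold_getD]
    have hmem : kv.1 ∈ moves.map Prod.fst := List.mem_map_of_mem hkv
    rw [if_pos hmem]
    have hitem : (kv.1, kv.2.map some)
        ∈ (PySem.Dict.mk (moves.map (fun kv => (kv.1, kv.2.map some)))).items :=
      List.mem_map_of_mem hkv
    rw [PySem.Dict.getD_of_mem_items _ hitem hndk]
    simp [pvFix, List.isEmpty_map]
  rw [hkeys, hlists]
  -- both sides now map over the same product; dict(zip(...)) is pvExtend from the empty dict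
  have hofList : ∀ c : List (Option String),
      (PySem.Dict.ofList ((moves.map Prod.fst).zip c) : PySem.Dict String (Option String))
        = pvExtend PySem.Dict.empty ((moves.map (·.1)).zip c) := fun _ => rfl
  simp only [List.map_map, Function.comp_def]
  apply List.map_congr_left
  intro c _
  rw [hofList]

-- ===== VERDICT (by name: the statement is the Claim_ definition above) =====
theorem generate_move_combinations_spec : Claim_equal_generate_move_combinations := by
  intro state moves _ hpre
  unfold Spec_generate_move_combinations
  exact generate_move_combinations_spec_aux state moves hpre
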